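-- pv_equiv track=rewrite | github.com/sseungki98/2024-Algorithm | 프로그래머스/2/150368. 이모티콘 할인행사/이모티콘 할인행사.py | solution
-- ===== SOURCE A (Python) =====
-- from itertools import product
--
-- def solution(users, emoticons):
--     rates = [10, 20, 30, 40]
--     emo_size = len(emoticons)
--     answer = [-1, -1]
--     rates_product = list(product(rates, repeat = emo_size))
--     for item in rates_product:
--         sale_price = []
--         for i in range(emo_size):
--             sale_price.append([emoticons[i] // 100 * (100-item[i]), item[i]])
--
--         plus_count = 0
--         price_count = 0
--         for user in users:
--             buy_price = 0
--             for sale in sale_price: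
--                 if sale[1] >= user[0]:
--                     buy_price += sale[0]
--
--             if buy_price >= user[1]:
--                 plus_count += 1
--             else:
--                 price_count += buy_price
--
--         if plus_count >= answer[0]:
--             if plus_count == answer[0]:
--                 answer = [plus_count, max(answer[1], price_count)]
--             else:
--                 answer = [plus_count, price_count]
--
--
--     return answer
-- ===== SOURCE B (Python) =====
-- def solution(users, emoticons):
--     def dfs(i, acc, best):
--         if i == len(emoticons):
--             plus = 0
--             price = 0
--             for a, u in zip(acc, users):
--                 if a >= u[1]:
--                     plus += 1
--                 else:
--                     price += a
--             if plus > best[0] or (plus == best[0] and price > best[1]):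
--                 return [plus, price]
--             return best
--         for rate in (10, 20, 30, 40):
--             add = emoticons[i] // 100 * (100 - rate)
--             best = dfs(i + 1, [a + add if u[0] <= rate else a for a, u in zip(acc, users)], best)
--         return best
--     return dfs(0, [0] * len(users), [-1, -1])
-- ===== Notes on version B (the rewrite author's own statement) =====
-- stated objective: alternative
-- what changed: Replaces the itertools.product list over all 4^n rate tuples plus per-tuple rebuilding of sale_price and per-user rescans with a recursive DFS over the emoticon index that threads each user's accumulated buy-price incrementally and updates the best (plus_count, price_count) pair at the leaves.
import Mathlib
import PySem

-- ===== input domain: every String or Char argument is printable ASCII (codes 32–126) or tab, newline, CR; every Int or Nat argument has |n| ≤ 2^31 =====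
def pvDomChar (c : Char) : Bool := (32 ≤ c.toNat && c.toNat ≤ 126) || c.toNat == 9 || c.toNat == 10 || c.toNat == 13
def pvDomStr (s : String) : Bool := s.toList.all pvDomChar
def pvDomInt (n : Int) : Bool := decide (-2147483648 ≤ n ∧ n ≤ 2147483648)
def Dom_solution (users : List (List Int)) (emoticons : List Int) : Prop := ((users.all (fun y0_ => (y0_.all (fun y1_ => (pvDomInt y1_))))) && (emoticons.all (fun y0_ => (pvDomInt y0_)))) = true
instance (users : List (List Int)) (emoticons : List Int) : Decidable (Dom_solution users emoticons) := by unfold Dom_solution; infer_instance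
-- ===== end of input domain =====

-- B replaces A's materialised itertools.product loop (rebuilding every sale price and rescanning
-- it per user for each of the 4^n tuples) by a DFS over the emoticon index that threads each
-- user's accumulated buy-price; equivalence of the return value is proved on Pre_ below.

-- ===== PORT A =====
-- xs[i] where A's loops keep i in range; getD 0 is never reached on Pre_ inputs.
def pvAGet (xs : List Int) (i : Int) : Int := (PySem.List.pyGet? xs i).getD 0

-- list(product([10,20,30,40], repeat = n)), first coordinate varying slowest
def pvAProd : Nat → List (List Int)
  | 0 => [[]]
  | n+1 => ([10, 20, 30, 40] : List Int).flatMap (fun r => (pvAProd n).map (fun t => r :: t))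

def solution (users : List (List Int)) (emoticons : List Int) : List Int :=
  let emo_size := emoticons.length
  (pvAProd emo_size).foldl (fun answer item =>
    let sale_price := (List.range emo_size).map (fun i =>
      [PySem.Int.floordiv (pvAGet emoticons (Int.ofNat i)) 100 * (100 - pvAGet item (Int.ofNat i)),
       pvAGet item (Int.ofNat i)])
    let counts := users.foldl (fun (pc : Int × Int) user =>
      let buy_price := sale_price.foldl (fun bp sale =>
        if pvAGet sale 1 ≥ pvAGet user 0 then bp + pvAGet sale 0 else bp) 0
      if buy_price ≥ pvAGet user 1 then (pc.1 + 1, pc.2) else (pc.1, pc.2 + buy_price)) (0, 0)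
    if counts.1 ≥ pvAGet answer 0 then
      if counts.1 = pvAGet answer 0 then [counts.1, max (pvAGet answer 1) counts.2]
      else [counts.1, counts.2]
    else answer) [-1, -1]

-- ===== PORT B =====
def pvBGet (xs : List Int) (i : Int) : Int := (PySem.List.pyGet? xs i).getD 0

-- the leaf of the DFS: count satisfied users / sum the rest, update best lexicographically
def pvBLeaf (users : List (List Int)) (acc : List Int) (best : List Int) : List Int :=
  let pp := (List.zip acc users).foldl (fun (pp : Int × Int) au =>
      if au.1 ≥ pvBGet au.2 1 then (pp.1 + 1, pp.2) else (pp.1, pp.2 + au.1)) ((0 : Int), (0 : Int))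
  if pp.1 > pvBGet best 0 ∨ (pp.1 = pvBGet best 0 ∧ pp.2 > pvBGet best 1) then [pp.1, pp.2] else best

-- dfs(i, acc, best); the fuel k = len(emoticons) - i makes the recursion structural
def pvBDfs (users : List (List Int)) (emoticons : List Int) :
    Nat → Nat → List Int → List Int → List Int
  | 0, _, acc, best => pvBLeaf users acc best
  | k+1, i, acc, best =>
    ([10, 20, 30, 40] : List Int).foldl (fun best rate =>
      let add := PySem.Int.floordiv (pvBGet emoticons (Int.ofNat i)) 100 * (100 - rate)
      pvBDfs users emoticons k (i+1)
        (List.zipWith (fun a u => if pvBGet u 0 ≤ rate then a + add else a) acc users) best) best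

def solution_alt (users : List (List Int)) (emoticons : List Int) : List Int :=
  pvBDfs users emoticons emoticons.length 0 (List.replicate users.length 0) [-1, -1]

-- ===== PRECONDITION & SPEC =====
-- Pre_ excludes exactly the inputs where the Pythons raise IndexError: a user entry with
-- fewer than two fields (A reads user[0] and user[1]).
def Pre_solution (users : List (List Int)) (_emoticons : List Int) : Prop :=
  ∀ u ∈ users, 2 ≤ u.length
instance (users : List (List Int)) (emoticons : List Int) : Decidable (Pre_solution users emoticons) := by unfold Pre_solution; infer_instance

def pvWitness_solution : List (List Int) × List Int := ([[40, 2800], [10, 5000]], [1300, 1500])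

def Spec_solution (users : List (List Int)) (emoticons : List Int) (out : List Int) : Prop := out = solution_alt users emoticons
instance (users : List (List Int)) (emoticons : List Int) (out : List Int) : Decidable (Spec_solution users emoticons out) := by unfold Spec_solution; infer_instance

-- ===== CLAIM (what is proved, stated in full; the proofs are below) =====
def Claim_equal_solution : Prop := ∀ (users : List (List Int)) (emoticons : List Int), Dom_solution users emoticons → Pre_solution users emoticons → Spec_solution users emoticons (solution users emoticons)

-- ===== LEMMAS AND PROOFS =====

-- price added at emoticon index i under rate r
def pvAdd (emoticons : List Int) (i : Nat) (r : Int) : Int :=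
  PySem.Int.floordiv (pvBGet emoticons (Int.ofNat i)) 100 * (100 - r)

-- total buy price of user u for the tail of rates `item` starting at emoticon index i
def pvBuy (emoticons : List Int) (u : List Int) : Nat → List Int → Int
  | _, [] => 0
  | i, r :: t => (if pvBGet u 0 ≤ r then pvAdd emoticons i r else 0) + pvBuy emoticons u (i+1) t

-- the accumulator the DFS reaches at a leaf, as a function of the remaining rate tuple
def pvFin (users : List (List Int)) (emoticons : List Int) : Nat → List Int → List Int → List Int
  | _, acc, [] => acc
  | i, acc, r :: t =>
    pvFin users emoticons (i+1)
      (List.zipWith (fun a u => if pvBGet u 0 ≤ r then a + pvAdd emoticons i r else a) acc users) t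

theorem pvAProd_length {k : Nat} {item : List Int} (h : item ∈ pvAProd k) :
    item.length = k := by
  induction k generalizing item with
  | zero => simp [pvAProd] at h; simp [h]
  | succ k ih =>
    simp only [pvAProd, List.mem_flatMap, List.mem_map] at h
    obtain ⟨r, _, t, ht, rfl⟩ := h
    simp [ih ht]

theorem pvBDfs_eq_foldl (users : List (List Int)) (emoticons : List Int) :
    ∀ (k i : Nat) (acc best : List Int),
      pvBDfs users emoticons k i acc best
        = (pvAProd k).foldl
            (fun best item => pvBLeaf users (pvFin users emoticons i acc item) best) best := by
  intro k
  induction k with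
  | zero => intro i acc best; simp [pvBDfs, pvAProd, pvFin]
  | succ k ih =>
    intro i acc best
    simp only [pvBDfs, pvAProd, List.flatMap_cons, List.flatMap_nil, List.append_nil,
      List.foldl_append, List.foldl_map, List.foldl_cons, List.foldl_nil, ih, pvFin, pvAdd]

theorem pvZip_fuse (users : List (List Int)) (f g : Int → List Int → Int) :
    ∀ acc : List Int,
      List.zipWith f (List.zipWith g acc users) users
        = List.zipWith (fun a u => f (g a u) u) acc users := by
  induction users with
  | nil => intro acc; simp
  | cons u us ih =>
    intro acc
    cases acc with
    | nil => simp
    | cons a t => simp [ih]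

theorem pvZip_congr (users : List (List Int)) (f g : Int → List Int → Int)
    (h : ∀ a u, f a u = g a u) :
    ∀ acc : List Int, List.zipWith f acc users = List.zipWith g acc users := by
  induction users with
  | nil => intro acc; simp
  | cons u us ih =>
    intro acc
    cases acc with
    | nil => simp
    | cons a t => simp [h, ih]

theorem pvZip_id (users : List (List Int)) :
    ∀ acc : List Int, acc.length = users.length →
      List.zipWith (fun (a : Int) (_ : List Int) => a) acc users = acc := by
  induction users with
  | nil => intro acc h; simp_all
  | cons u us ih =>
    intro acc h
    cases acc with
    | nil => simp at h
    | cons a t => simp at h; simp [ih t h]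

theorem pvZip_map_self (users : List (List Int)) (f : List Int → Int) :
    List.zip (users.map f) users = users.map (fun u => (f u, u)) := by
  induction users with
  | nil => simp
  | cons u us ih => simp [ih]

theorem pvFoldl_congr {α β : Type} (l : List β) (f g : α → β → α) :
    ∀ b : α, (∀ (b' : α) (x : β), x ∈ l → f b' x = g b' x) →
      l.foldl f b = l.foldl g b := by
  induction l with
  | nil => intro b _; rfl
  | cons x t ih =>
    intro b h
    simp only [List.foldl_cons]
    rw [h b x (by simp)]
    exact ih _ (fun b' y hy => h b' y (by simp [hy]))

theorem pvBLeaf_shape (users : List (List Int)) (acc : List Int) (b0 b1 : Int) :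
    ∃ c0 c1 : Int, pvBLeaf users acc [b0, b1] = [c0, c1] := by
  unfold pvBLeaf
  by_cases h : (List.foldl
      (fun pp au => if au.1 ≥ pvBGet au.2 1 then (pp.1 + 1, pp.2) else (pp.1, pp.2 + au.1))
      ((0 : Int), (0 : Int)) (List.zip acc users)).1 > pvBGet [b0, b1] 0 ∨
      ((List.foldl (fun pp au => if au.1 ≥ pvBGet au.2 1 then (pp.1 + 1, pp.2) else (pp.1, pp.2 + au.1))
        ((0 : Int), (0 : Int)) (List.zip acc users)).1 = pvBGet [b0, b1] 0 ∧
       (List.foldl (fun pp au => if au.1 ≥ pvBGet au.2 1 then (pp.1 + 1, pp.2) else (pp.1, pp.2 + au.1))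
        ((0 : Int), (0 : Int)) (List.zip acc users)).2 > pvBGet [b0, b1] 1)
  · rw [if_pos h]; exact ⟨_, _, rfl⟩
  · rw [if_neg h]; exact ⟨b0, b1, rfl⟩

theorem pvFin_zip (users : List (List Int)) (emoticons : List Int) :
    ∀ (item : List Int) (i : Nat) (acc : List Int), acc.length = users.length →
      pvFin users emoticons i acc item
        = List.zipWith (fun a u => a + pvBuy emoticons u i item) acc users := by
  intro item
  induction item with
  | nil =>
    intro i acc h
    simp only [pvFin, pvBuy, add_zero]
    exact (pvZip_id users acc h).symm
  | cons r t ih =>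
    intro i acc h
    simp only [pvFin]
    rw [ih (i+1) _ (by simp [h]), pvZip_fuse]
    apply pvZip_congr
    intro a u
    simp only [pvBuy]
    split <;> ring

theorem pvZip_replicate (users : List (List Int)) (f : Int → List Int → Int) :
    List.zipWith f (List.replicate users.length 0) users = users.map (f 0) := by
  induction users with
  | nil => simp
  | cons u us ih => simp [List.replicate_succ, ih]

-- A's buy_price fold equals pvBuy on the item that built sale_price
theorem pvBuy_eq (emoticons : List Int) (u : List Int) :
    ∀ (item : List Int) (i0 : Nat) (b : Int),
      ((List.range item.length).map (fun i =>
          [PySem.Int.floordiv (pvAGet emoticons (Int.ofNat (i0 + i))) 100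
             * (100 - pvAGet item (Int.ofNat i)), pvAGet item (Int.ofNat i)])).foldl
        (fun bp sale => if pvAGet sale 1 ≥ pvAGet u 0 then bp + pvAGet sale 0 else bp) b
        = b + pvBuy emoticons u i0 item := by
  intro item
  induction item with
  | nil => intro i0 b; simp [pvBuy]
  | cons r t ih =>
    intro i0 b
    simp only [List.length_cons]
    rw [List.range_succ_eq_map]
    simp only [List.map_cons, List.map_map, List.foldl_cons, Function.comp_def,
      Nat.succ_eq_add_one, Nat.add_zero]
    have hhead : pvAGet (r :: t) (Int.ofNat 0) = r := by
      rw [show Int.ofNat 0 = (0 : Int) from rfl]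
      simp [pvAGet]
    have hstep : ∀ i : Nat, pvAGet (r :: t) (Int.ofNat (i + 1)) = pvAGet t (Int.ofNat i) := by
      intro i
      unfold pvAGet
      rw [Int.ofNat_eq_natCast, Int.ofNat_eq_natCast, Nat.cast_add, Nat.cast_one,
        PySem.List.pyGet?_cons_succ]
    have hrw : (List.range t.length).map (fun i =>
          [PySem.Int.floordiv (pvAGet emoticons (Int.ofNat (i0 + (i + 1)))) 100
             * (100 - pvAGet (r :: t) (Int.ofNat (i + 1))), pvAGet (r :: t) (Int.ofNat (i + 1))])
        = (List.range t.length).map (fun i =>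
          [PySem.Int.floordiv (pvAGet emoticons (Int.ofNat ((i0 + 1) + i))) 100
             * (100 - pvAGet t (Int.ofNat i)), pvAGet t (Int.ofNat i)]) := by
      apply List.map_congr_left
      intro i _
      rw [hstep i]
      have : i0 + (i + 1) = (i0 + 1) + i := by omega
      rw [this]
    rw [hrw, ih (i0 + 1)]
    simp only [pvBuy, pvAdd, hhead]
    have hget1 : ∀ x y : Int, pvAGet [x, y] 1 = y := by intro x y; rfl
    have hget0 : ∀ x y : Int, pvAGet [x, y] 0 = x := by intro x y; rfl
    rw [hget1, hget0]
    have hcond : (r ≥ pvAGet u 0) = (pvBGet u 0 ≤ r) := by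
      simp [pvAGet, pvBGet, ge_iff_le]
    by_cases hc : pvBGet u 0 ≤ r
    · rw [if_pos (by simpa [ge_iff_le, pvAGet, pvBGet] using hc), if_pos hc]
      have : pvAGet emoticons (Int.ofNat i0) = pvBGet emoticons (Int.ofNat i0) := rfl
      rw [this]; ring
    · rw [if_neg (by simpa [ge_iff_le, pvAGet, pvBGet] using hc), if_neg hc]
      ring

-- per-item: A's fold step applied to answer = B's leaf applied to the DFS accumulator
theorem pvStep_eq (users : List (List Int)) (emoticons : List Int)
    (item : List Int) (hlen : item.length = emoticons.length) (b0 b1 : Int) :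
    (let sale_price := (List.range emoticons.length).map (fun i =>
        [PySem.Int.floordiv (pvAGet emoticons (Int.ofNat i)) 100 * (100 - pvAGet item (Int.ofNat i)),
         pvAGet item (Int.ofNat i)])
     let counts := users.foldl (fun (pc : Int × Int) user =>
        let buy_price := sale_price.foldl (fun bp sale =>
          if pvAGet sale 1 ≥ pvAGet user 0 then bp + pvAGet sale 0 else bp) 0
        if buy_price ≥ pvAGet user 1 then (pc.1 + 1, pc.2) else (pc.1, pc.2 + buy_price)) (0, 0)
     if counts.1 ≥ pvAGet [b0, b1] 0 then
       if counts.1 = pvAGet [b0, b1] 0 then [counts.1, max (pvAGet [b0, b1] 1) counts.2]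
       else [counts.1, counts.2]
     else [b0, b1])
    = pvBLeaf users (pvFin users emoticons 0 (List.replicate users.length 0) item) [b0, b1] := by
  rw [pvFin_zip users emoticons item 0 _ (by simp), pvZip_replicate]
  have hbuy : ∀ u : List Int,
      ((List.range emoticons.length).map (fun i =>
          [PySem.Int.floordiv (pvAGet emoticons (Int.ofNat i)) 100 * (100 - pvAGet item (Int.ofNat i)),
           pvAGet item (Int.ofNat i)])).foldl
        (fun bp sale => if pvAGet sale 1 ≥ pvAGet u 0 then bp + pvAGet sale 0 else bp) 0
        = pvBuy emoticons u 0 item := by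
    intro u
    have := pvBuy_eq emoticons u item 0 0
    simpa [hlen] using this
  simp only [pvBLeaf]
  have hz : List.zip (users.map (fun u => (0 : Int) + pvBuy emoticons u 0 item)) users
      = users.map (fun u => ((0 : Int) + pvBuy emoticons u 0 item, u)) := by
    exact pvZip_map_self users _
  rw [hz, List.foldl_map]
  have hcounts : users.foldl (fun (pc : Int × Int) user =>
        if ((List.range emoticons.length).map (fun i =>
          [PySem.Int.floordiv (pvAGet emoticons (Int.ofNat i)) 100 * (100 - pvAGet item (Int.ofNat i)),
           pvAGet item (Int.ofNat i)])).foldl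
          (fun bp sale => if pvAGet sale 1 ≥ pvAGet user 0 then bp + pvAGet sale 0 else bp) 0
          ≥ pvAGet user 1 then (pc.1 + 1, pc.2)
        else (pc.1, pc.2 + ((List.range emoticons.length).map (fun i =>
          [PySem.Int.floordiv (pvAGet emoticons (Int.ofNat i)) 100 * (100 - pvAGet item (Int.ofNat i)),
           pvAGet item (Int.ofNat i)])).foldl
          (fun bp sale => if pvAGet sale 1 ≥ pvAGet user 0 then bp + pvAGet sale 0 else bp) 0))
        ((0 : Int), (0 : Int))
      = users.foldl (fun (pp : Int × Int) u =>
          if (0 : Int) + pvBuy emoticons u 0 item ≥ pvBGet u 1 then (pp.1 + 1, pp.2)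
          else (pp.1, pp.2 + ((0 : Int) + pvBuy emoticons u 0 item))) ((0 : Int), (0 : Int)) := by
    apply pvFoldl_congr
    intro pc user _
    rw [hbuy user]
    have : pvAGet user 1 = pvBGet user 1 := rfl
    rw [this]
    simp
  rw [hcounts]
  set pp := users.foldl (fun (pp : Int × Int) u =>
      if (0 : Int) + pvBuy emoticons u 0 item ≥ pvBGet u 1 then (pp.1 + 1, pp.2)
      else (pp.1, pp.2 + ((0 : Int) + pvBuy emoticons u 0 item))) ((0 : Int), (0 : Int)) with hpp
  have hb0 : pvAGet [b0, b1] 0 = b0 := rfl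
  have hb1 : pvAGet [b0, b1] 1 = b1 := rfl
  have hb0' : pvBGet [b0, b1] 0 = b0 := rfl
  have hb1' : pvBGet [b0, b1] 1 = b1 := rfl
  rw [hb0, hb1, hb0', hb1']
  by_cases h1 : pp.1 > b0
  · rw [if_pos (Or.inl h1), if_pos (le_of_lt h1), if_neg (by omega)]
  · by_cases h2 : pp.1 = b0
    · rw [if_pos (by omega), if_pos h2]
      by_cases h3 : pp.2 > b1
      · rw [if_pos (Or.inr ⟨h2, h3⟩)]
        have : max b1 pp.2 = pp.2 := by omega
        rw [this, h2]
      · rw [if_neg (by rintro (h | ⟨_, h⟩) <;> omega)]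
        have : max b1 pp.2 = b1 := by omega
        rw [this, h2]
    · rw [if_neg (by omega), if_neg (by rintro (h | ⟨h, _⟩) <;> omega)]

-- folds over a product list agree when each step agrees and preserves the [b0, b1] shape
theorem pvFold_eq (users : List (List Int)) (emoticons : List Int) :
    ∀ (l : List (List Int)) (b0 b1 : Int),
      (∀ item ∈ l, item.length = emoticons.length) →
      l.foldl (fun answer item =>
        let sale_price := (List.range emoticons.length).map (fun i =>
          [PySem.Int.floordiv (pvAGet emoticons (Int.ofNat i)) 100 * (100 - pvAGet item (Int.ofNat i)),
           pvAGet item (Int.ofNat i)])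
        let counts := users.foldl (fun (pc : Int × Int) user =>
          let buy_price := sale_price.foldl (fun bp sale =>
            if pvAGet sale 1 ≥ pvAGet user 0 then bp + pvAGet sale 0 else bp) 0
          if buy_price ≥ pvAGet user 1 then (pc.1 + 1, pc.2) else (pc.1, pc.2 + buy_price)) (0, 0)
        if counts.1 ≥ pvAGet answer 0 then
          if counts.1 = pvAGet answer 0 then [counts.1, max (pvAGet answer 1) counts.2]
          else [counts.1, counts.2]
        else answer) [b0, b1]
      = l.foldl (fun best item =>
          pvBLeaf users (pvFin users emoticons 0 (List.replicate users.length 0) item) best)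
          [b0, b1] := by
  intro l
  induction l with
  | nil => intro b0 b1 _; rfl
  | cons item t ih =>
    intro b0 b1 hl
    simp only [List.foldl_cons]
    rw [pvStep_eq users emoticons item (hl item (by simp)) b0 b1]
    set nb := pvBLeaf users (pvFin users emoticons 0 (List.replicate users.length 0) item) [b0, b1]
      with hnb
    obtain ⟨c0, c1, hc⟩ := hnb ▸ pvBLeaf_shape users _ b0 b1
    rw [hc]
    exact ih c0 c1 (fun x hx => hl x (by simp [hx]))

-- ===== VERDICT (by name: the statement is the Claim_ definition above) =====
theorem solution_spec : Claim_equal_solution := by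
  intro users emoticons _ _
  unfold Spec_solution solution solution_alt
  rw [pvBDfs_eq_foldl]
  exact pvFold_eq users emoticons (pvAProd emoticons.length) (-1) (-1)
    (fun item h => pvAProd_length h)
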